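-- pv_equiv track=rewrite | github.com/siglezmus/tic-tac-toe | client.py | getRowAndColomnFromMousePosition
-- ===== SOURCE A (Python) =====
-- horizontalPadding = 150
--
-- verticalPadding = 150
--
-- innerSpaces = 10
--
-- squareWidth = 100
--
-- squareHeight = 100
--
-- def getRowAndColomnFromMousePosition(pos):
--     posX = pos[0]
--     posY = pos[1]
--
--     block = squareWidth + innerSpaces
--
--     for i in range(3):
--         for j in range(3):
--             if((posX >= horizontalPadding + i*block and posX <= horizontalPadding + i*block + squareWidth)
--                     and (posY >= verticalPadding + j*block and posY <= verticalPadding + j*block + squareHeight)):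
--                 return(str(j) + str(i))
-- ===== SOURCE B (Python) =====
-- horizontalPadding = 150
--
-- verticalPadding = 150
--
-- innerSpaces = 10
--
-- squareWidth = 100
--
-- squareHeight = 100
--
-- def getRowAndColomnFromMousePosition(pos):
--     block = squareWidth + innerSpaces
--     dx = pos[0] - horizontalPadding
--     dy = pos[1] - verticalPadding
--     i = dx // block
--     j = dy // block
--     if 0 <= i <= 2 and dx - i * block <= squareWidth and 0 <= j <= 2 and dy - j * block <= squareHeight:
--         return str(j) + str(i)
-- ===== Notes on version B (the rewrite author's own statement) =====
-- stated objective: simpler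
-- what changed: Replaced the 3x3 scan over all nine boxes with direct arithmetic: floor-divide the padded offsets by the block size to get the cell indices, then validate the remainder against the square size.
import Mathlib
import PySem

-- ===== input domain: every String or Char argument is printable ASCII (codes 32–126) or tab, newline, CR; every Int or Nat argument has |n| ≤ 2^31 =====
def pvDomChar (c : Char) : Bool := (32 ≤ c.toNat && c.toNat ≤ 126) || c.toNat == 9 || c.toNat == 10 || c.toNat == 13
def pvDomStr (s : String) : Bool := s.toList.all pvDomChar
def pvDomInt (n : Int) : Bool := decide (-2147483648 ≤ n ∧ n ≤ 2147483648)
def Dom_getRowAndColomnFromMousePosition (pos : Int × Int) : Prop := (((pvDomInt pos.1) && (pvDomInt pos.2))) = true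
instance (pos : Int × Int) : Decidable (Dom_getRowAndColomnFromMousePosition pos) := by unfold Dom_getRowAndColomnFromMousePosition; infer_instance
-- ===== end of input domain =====

-- B replaces A's scan over all nine boxes by closed-form floor division of the padded
-- offsets by the block size (objective: simpler).

def horizontalPadding : Int := 150
def verticalPadding : Int := 150
def innerSpaces : Int := 10
def squareWidth : Int := 100
def squareHeight : Int := 100

-- ===== PORT A =====
-- inner 'for j in range(3)' loop: first j whose box contains the point
def pvA_inner (posX posY block i : Int) : List Int → Option String
  | [] => none
  | j :: js =>
    if (posX ≥ horizontalPadding + i * block ∧ posX ≤ horizontalPadding + i * block + squareWidth)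
        ∧ (posY ≥ verticalPadding + j * block ∧ posY ≤ verticalPadding + j * block + squareHeight)
    then some (PySem.Int.toStr j ++ PySem.Int.toStr i)
    else pvA_inner posX posY block i js

-- outer 'for i in range(3)' loop
def pvA_outer (posX posY block : Int) : List Int → Option String
  | [] => none
  | i :: is =>
    match pvA_inner posX posY block i (PySem.List.pyRange 0 3 1) with
    | some s => some s
    | none => pvA_outer posX posY block is

def getRowAndColomnFromMousePosition (pos : Int × Int) : Option String :=
  let posX := pos.1
  let posY := pos.2
  let block := squareWidth + innerSpaces
  pvA_outer posX posY block (PySem.List.pyRange 0 3 1)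

-- ===== PORT B =====
def getRowAndColomnFromMousePosition_alt (pos : Int × Int) : Option String :=
  let block := squareWidth + innerSpaces
  let dx := pos.1 - horizontalPadding
  let dy := pos.2 - verticalPadding
  let i := PySem.Int.floordiv dx block
  let j := PySem.Int.floordiv dy block
  if 0 ≤ i ∧ i ≤ 2 ∧ dx - i * block ≤ squareWidth ∧ 0 ≤ j ∧ j ≤ 2 ∧ dy - j * block ≤ squareHeight
  then some (PySem.Int.toStr j ++ PySem.Int.toStr i)
  else none

-- ===== PRECONDITION & SPEC =====
def Spec_getRowAndColomnFromMousePosition (pos : Int × Int) (out : Option String) : Prop := out = getRowAndColomnFromMousePosition_alt pos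
instance (pos : Int × Int) (out : Option String) : Decidable (Spec_getRowAndColomnFromMousePosition pos out) := by unfold Spec_getRowAndColomnFromMousePosition; infer_instance

-- ===== CLAIM (what is proved, stated in full; the proofs are below) =====
def Claim_equal_getRowAndColomnFromMousePosition : Prop := ∀ (pos : Int × Int), Dom_getRowAndColomnFromMousePosition pos → Spec_getRowAndColomnFromMousePosition pos (getRowAndColomnFromMousePosition pos)

-- ===== LEMMAS AND PROOFS =====

set_option maxHeartbeats 4000000 in
theorem pv_main (pos : Int × Int) :
    getRowAndColomnFromMousePosition pos = getRowAndColomnFromMousePosition_alt pos := by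
  obtain ⟨x, y⟩ := pos
  have hrange : PySem.List.pyRange 0 3 1 = [0, 1, 2] := by decide
  have hdx := PySem.Int.floordiv_eq_iff_of_pos (a := x - 150) (b := 110) (q := PySem.Int.floordiv (x - 150) 110) (by omega)
  have hdy := PySem.Int.floordiv_eq_iff_of_pos (a := y - 150) (b := 110) (q := PySem.Int.floordiv (y - 150) 110) (by omega)
  have hx := hdx.mp rfl
  have hy := hdy.mp rfl
  simp only [getRowAndColomnFromMousePosition, getRowAndColomnFromMousePosition_alt,
    pvA_outer, pvA_inner, hrange, horizontalPadding, verticalPadding, innerSpaces,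
    squareWidth, squareHeight]
  simp only [show (100:Int) + 10 = 110 from by norm_num]
  set qx := PySem.Int.floordiv (x - 150) 110 with hqx
  set qy := PySem.Int.floordiv (y - 150) 110 with hqy
  split_ifs <;>
    first
      | rfl
      | (exfalso; omega)
      | (rcases (show qx = 0 ∨ qx = 1 ∨ qx = 2 from by omega) with h | h | h <;>
         rcases (show qy = 0 ∨ qy = 1 ∨ qy = 2 from by omega) with h' | h' | h' <;>
         simp only [h, h'] <;> first | rfl | (exfalso; omega))

-- ===== VERDICT (by name: the statement is the Claim_ definition above) =====
theorem getRowAndColomnFromMousePosition_spec : Claim_equal_getRowAndColomnFromMousePosition := by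
  intro pos _
  exact pv_main pos
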